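-- pv_equiv track=rewrite | github.com/gospelo-dev/kata | gospelo_kata/template.py | _split_filters
-- ===== SOURCE A (Python) =====
-- def _split_filters(expr: str) -> list[str]:
--     """Split expression by | (pipe) for filters, respecting strings and parens."""
--     parts: list[str] = []
--     current = ""
--     depth = 0
--     in_str: str | None = None
--     i = 0
--     while i < len(expr):
--         ch = expr[i]
--         if in_str:
--             current += ch
--             if ch == in_str and (i == 0 or expr[i - 1] != "\\"):
--                 in_str = None
--         elif ch in ('"', "'"):
--             in_str = ch
--             current += ch
--         elif ch == "(":
--             depth += 1
--             current += ch
--         elif ch == ")":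
--             depth -= 1
--             current += ch
--         elif ch == "|" and depth == 0:
--             parts.append(current)
--             current = ""
--         else:
--             current += ch
--         i += 1
--     if current:
--         parts.append(current)
--     return parts
-- ===== SOURCE B (Python) =====
-- def _split_filters(expr: str) -> list[str]:
--     """Two-phase: collect the positions of top-level pipes, then slice the string at them."""
--     cuts = []
--     depth = 0
--     in_str = None
--     for i, ch in enumerate(expr):
--         if in_str:
--             if ch == in_str and (i == 0 or expr[i - 1] != "\\"):
--                 in_str = None
--         elif ch in ('"', "'"):
--             in_str = ch
--         elif ch == "(":
--             depth += 1
--         elif ch == ")":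
--             depth -= 1
--         elif ch == "|" and depth == 0:
--             cuts.append(i)
--     parts = []
--     start = 0
--     for c in cuts:
--         parts.append(expr[start:c])
--         start = c + 1
--     last = expr[start:]
--     if last:
--         parts.append(last)
--     return parts
-- ===== Notes on version B (the rewrite author's own statement) =====
-- stated objective: faster
-- what changed: B splits in two phases - a scan that only records the positions of top-level pipes, then string slicing at those cut points - instead of A's single loop that grows each segment character by character with string concatenation.
import Mathlib
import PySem

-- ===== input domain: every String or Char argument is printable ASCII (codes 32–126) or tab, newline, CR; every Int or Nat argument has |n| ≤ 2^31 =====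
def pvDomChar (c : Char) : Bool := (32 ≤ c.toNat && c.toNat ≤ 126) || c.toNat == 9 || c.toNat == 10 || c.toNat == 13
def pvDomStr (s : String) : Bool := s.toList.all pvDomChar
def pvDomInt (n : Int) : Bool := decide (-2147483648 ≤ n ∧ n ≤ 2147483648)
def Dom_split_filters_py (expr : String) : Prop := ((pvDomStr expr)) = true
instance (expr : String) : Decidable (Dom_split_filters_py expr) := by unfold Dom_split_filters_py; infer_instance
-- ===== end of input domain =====

-- B replaces A's char-by-char segment accumulator with a two-phase split: collect top-level
-- pipe positions, then slice the string at them, avoiding per-char string concatenation (faster).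

-- ===== PORT A =====
-- A's while-loop as structural recursion over the char list; `prev` carries expr[i-1]
-- (used only by the escape check `i == 0 or expr[i-1] != "\\"`; prev = none ↔ i = 0).
def splitLoopA : List Char → Option Char → List String → List Char → Int → Option Char → List String
  | [], _, parts, current, _, _ =>
      if current ≠ [] then parts ++ [String.mk current] else parts
  | ch :: rest, prev, parts, current, depth, instr =>
      match instr with
      | some q =>
          if ch == q && (match prev with | none => true | some p => p ≠ '\\') then
            splitLoopA rest (some ch) parts (current ++ [ch]) depth none
          else
            splitLoopA rest (some ch) parts (current ++ [ch]) depth (some q)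
      | none =>
          if ch == '"' || ch == '\'' then
            splitLoopA rest (some ch) parts (current ++ [ch]) depth (some ch)
          else if ch == '(' then
            splitLoopA rest (some ch) parts (current ++ [ch]) (depth + 1) none
          else if ch == ')' then
            splitLoopA rest (some ch) parts (current ++ [ch]) (depth - 1) none
          else if ch == '|' && depth == 0 then
            splitLoopA rest (some ch) (parts ++ [String.mk current]) [] depth none
          else
            splitLoopA rest (some ch) parts (current ++ [ch]) depth none

def split_filters_py (expr : String) : List String :=
  splitLoopA expr.toList none [] [] 0 none

-- ===== PORT B =====
-- Phase 1 of Source B: positions (absolute index i) of every '|' at depth 0 outside strings.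
def cutsB : List Char → Nat → Option Char → Int → Option Char → List Nat
  | [], _, _, _, _ => []
  | ch :: rest, i, prev, depth, instr =>
      match instr with
      | some q =>
          if ch == q && (match prev with | none => true | some p => p ≠ '\\') then
            cutsB rest (i + 1) (some ch) depth none
          else
            cutsB rest (i + 1) (some ch) depth (some q)
      | none =>
          if ch == '"' || ch == '\'' then
            cutsB rest (i + 1) (some ch) depth (some ch)
          else if ch == '(' then
            cutsB rest (i + 1) (some ch) (depth + 1) none
          else if ch == ')' then
            cutsB rest (i + 1) (some ch) (depth - 1) none
          else if ch == '|' && depth == 0 then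
            i :: cutsB rest (i + 1) (some ch) depth none
          else
            cutsB rest (i + 1) (some ch) depth none

-- Phase 2 of Source B: slice between consecutive cut points; expr[start:c] = (drop start).take (c-start).
def segsB (s : List Char) : Nat → List Nat → List String
  | start, [] =>
      let last := s.drop start
      if last ≠ [] then [String.mk last] else []
  | start, c :: rest =>
      String.mk ((s.drop start).take (c - start)) :: segsB s (c + 1) rest

def split_filters_py_alt (expr : String) : List String :=
  segsB expr.toList 0 (cutsB expr.toList 0 none 0 none)

-- ===== PRECONDITION & SPEC =====
def Spec_split_filters_py (expr : String) (out : List String) : Prop := out = split_filters_py_alt expr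
instance (expr : String) (out : List String) : Decidable (Spec_split_filters_py expr out) := by unfold Spec_split_filters_py; infer_instance

-- ===== CLAIM (what is proved, stated in full; the proofs are below) =====
def Claim_equal_split_filters_py : Prop := ∀ (expr : String), Dom_split_filters_py expr → Spec_split_filters_py expr (split_filters_py expr)

-- ===== LEMMAS AND PROOFS =====

theorem pv_take_snoc (s : List Char) (lastStart start : Nat) (c : Char) (rest : List Char)
    (h : s.drop start = c :: rest) (hle : lastStart ≤ start) :
    (s.drop lastStart).take (start + 1 - lastStart)
      = (s.drop lastStart).take (start - lastStart) ++ [c] := by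
  have hd : (s.drop lastStart).drop (start - lastStart) = c :: rest := by
    rw [List.drop_drop]
    have heq : lastStart + (start - lastStart) = start := by omega
    rw [heq, h]
  have hget : (s.drop lastStart)[start - lastStart]? = some c := by
    rw [← List.head?_drop, hd]; rfl
  have : start + 1 - lastStart = (start - lastStart) + 1 := by omega
  rw [this, List.take_succ, hget]
  rfl

theorem pv_drop_succ (s : List Char) (start : Nat) (c : Char) (rest : List Char)
    (h : s.drop start = c :: rest) : s.drop (start + 1) = rest := by
  have : s.drop (start + 1) = (s.drop start).drop 1 := by
    rw [List.drop_drop]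
  rw [this, h]
  rfl

theorem pv_main : ∀ (cs : List Char) (s : List Char) (lastStart start : Nat)
    (prev : Option Char) (depth : Int) (instr : Option Char) (parts : List String),
    s.drop start = cs → lastStart ≤ start →
    splitLoopA cs prev parts ((s.drop lastStart).take (start - lastStart)) depth instr
      = parts ++ segsB s lastStart (cutsB cs start prev depth instr) := by
  intro cs
  induction cs with
  | nil =>
      intro s lastStart start prev depth instr parts h hle
      have hlen : s.length ≤ start := by
        have := List.drop_eq_nil_iff.mp h
        omega
      have htake : (s.drop lastStart).take (start - lastStart) = s.drop lastStart := by
        apply List.take_of_length_le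
        rw [List.length_drop]
        omega
      simp only [splitLoopA, cutsB, segsB, htake]
      split <;> simp
  | cons c rest ih =>
      intro s lastStart start prev depth instr parts h hle
      have h1 : s.drop (start + 1) = rest := pv_drop_succ s start c rest h
      have hsnoc := pv_take_snoc s lastStart start c rest h hle
      have hle1 : lastStart ≤ start + 1 := by omega
      cases instr with
      | some q =>
          cases prev <;>
          · simp only [splitLoopA, cutsB]
            split
            · rw [← hsnoc]; exact ih s lastStart (start + 1) (some c) depth none parts h1 hle1
            · rw [← hsnoc]; exact ih s lastStart (start + 1) (some c) depth (some q) parts h1 hle1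
      | none =>
          simp only [splitLoopA, cutsB]
          split
          · rw [← hsnoc]; exact ih s lastStart (start + 1) (some c) depth (some c) parts h1 hle1
          · split
            · rw [← hsnoc]; exact ih s lastStart (start + 1) (some c) (depth + 1) none parts h1 hle1
            · split
              · rw [← hsnoc]; exact ih s lastStart (start + 1) (some c) (depth - 1) none parts h1 hle1
              · split
                · -- pipe at top level: a cut at position `start`
                  have hseg : segsB s lastStart (start :: cutsB rest (start + 1) (some c) depth none)
                      = String.mk ((s.drop lastStart).take (start - lastStart))
                          :: segsB s (start + 1) (cutsB rest (start + 1) (some c) depth none) := rfl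
                  rw [hseg]
                  have := ih s (start + 1) (start + 1) (some c) depth none
                      (parts ++ [String.mk ((s.drop lastStart).take (start - lastStart))]) h1 (le_refl _)
                  simp only [Nat.sub_self, List.take_zero] at this
                  rw [this, List.append_assoc]
                  rfl
                · rw [← hsnoc]; exact ih s lastStart (start + 1) (some c) depth none parts h1 hle1

-- ===== VERDICT (by name: the statement is the Claim_ definition above) =====
theorem split_filters_py_spec : Claim_equal_split_filters_py := by
  intro expr _
  unfold Spec_split_filters_py split_filters_py split_filters_py_alt
  have := pv_main expr.toList expr.toList 0 0 none 0 none [] (by simp) (le_refl 0)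
  simpa using this
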